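-- pv_equiv track=rewrite | github.com/0xhtml/cms | cms/__init__.py | _check_path_name
-- ===== SOURCE A (Python) =====
-- from typing import Optional
--
-- def _check_path_name(name: str, label: str, chars: str) -> Optional[str]:
--     if not name:
--         return f"Kein {label}"
--
--     clean_name = name
--     for char in chars:
--         clean_name = clean_name.replace(char, "c")
--
--     if not name.isascii() or not clean_name.isalnum():
--         return (
--             f"Der {label} darf nur aus Buchstaben (keine Umlaute), Zahlen und "
--             f"{', '.join(chars)} bestehen."
--         )
-- ===== SOURCE B (Python) =====
-- from typing import Optional
--
--
-- def _has_bad(name: str, allowed: set) -> bool: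
--     for ch in name:
--         if not ch.isascii() or not (ch.isalnum() or ch in allowed):
--             return True
--     return False
--
--
-- def _check_path_name(name: str, label: str, chars: str) -> Optional[str]:
--     if not name:
--         return f"Kein {label}"
--     if _has_bad(name, set(chars)):
--         return (
--             f"Der {label} darf nur aus Buchstaben (keine Umlaute), Zahlen und "
--             f"{', '.join(chars)} bestehen."
--         )
--     return None
-- ===== Notes on version B (the rewrite author's own statement) =====
-- stated objective: faster
-- what changed: B precomputes a set of the extra allowed characters and rejects on the first bad character in one early-exit scan of the name, instead of A's building a scratch copy of the name with one str.replace pass per character of chars and then rescanning the copy with isalnum.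
import Mathlib
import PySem

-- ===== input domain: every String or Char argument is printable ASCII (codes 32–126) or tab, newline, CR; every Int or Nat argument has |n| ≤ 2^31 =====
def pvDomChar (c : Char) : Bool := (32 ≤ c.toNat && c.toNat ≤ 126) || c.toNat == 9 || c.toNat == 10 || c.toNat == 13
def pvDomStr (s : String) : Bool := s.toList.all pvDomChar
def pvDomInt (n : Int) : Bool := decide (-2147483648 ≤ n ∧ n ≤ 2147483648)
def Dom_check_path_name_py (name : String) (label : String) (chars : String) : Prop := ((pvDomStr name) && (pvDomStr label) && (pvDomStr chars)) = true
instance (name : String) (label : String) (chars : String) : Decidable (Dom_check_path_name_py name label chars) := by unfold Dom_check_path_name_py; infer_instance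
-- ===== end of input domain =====

-- B scans the name once with a recursive reject-on-first-bad-character helper over a
-- precomputed set of the extra allowed characters, instead of A's scratch string built
-- by repeated str.replace and rescanned with isalnum; objective: faster (constant factor).


-- ===== PORT A =====
-- str.isascii(): every code point ≤ 127 (exact; PySem has no isascii primitive)
def pyIsascii (s : String) : Bool := s.toList.all (fun c => c.toNat ≤ 127)

def check_path_name_py (name : String) (label : String) (chars : String) : Option String :=
  if name = "" then some ("Kein " ++ label)
  else
    let clean_name := chars.toList.foldl
      (fun cn ch => PySem.Str.replace cn (String.ofList [ch]) "c") name
    if !(pyIsascii name) || !(PySem.Str.strIsalnum clean_name) then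
      some ("Der " ++ label ++ " darf nur aus Buchstaben (keine Umlaute), Zahlen und "
        ++ PySem.Str.join ", " (chars.toList.map (fun c => String.ofList [c])) ++ " bestehen.")
    else none

-- ===== PORT B =====
-- _has_bad(name, allowed): the for-loop with early 'return True' becomes structural
-- recursion over the characters; 'ch in allowed' (a Python set) is PySem.Set.contains (exact)
def pvHasBad : List Char → PySem.Set Char → Bool
  | [], _ => false
  | ch :: rest, allowed =>
    if !(decide (ch.toNat ≤ 127)) || !(PySem.Chars.isalnum ch || PySem.Set.contains allowed ch)
    then true
    else pvHasBad rest allowed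

def check_path_name_py_alt (name : String) (label : String) (chars : String) : Option String :=
  if name = "" then some ("Kein " ++ label)
  else if pvHasBad name.toList (PySem.Set.ofList chars.toList) then
    some ("Der " ++ label ++ " darf nur aus Buchstaben (keine Umlaute), Zahlen und "
      ++ PySem.Str.join ", " (chars.toList.map (fun c => String.ofList [c])) ++ " bestehen.")
  else none

-- ===== PRECONDITION & SPEC =====
def Spec_check_path_name_py (name : String) (label : String) (chars : String) (out : Option String) : Prop := out = check_path_name_py_alt name label chars
instance (name : String) (label : String) (chars : String) (out : Option String) : Decidable (Spec_check_path_name_py name label chars out) := by unfold Spec_check_path_name_py; infer_instance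

-- ===== CLAIM (what is proved, stated in full; the proofs are below) =====
def Claim_equal_check_path_name_py : Prop := ∀ (name : String) (label : String) (chars : String), Dom_check_path_name_py name label chars → Spec_check_path_name_py name label chars (check_path_name_py name label chars)

-- ===== LEMMAS AND PROOFS =====

-- all only depends on its predicate's values on members
theorem pv_all_congr_mem {α : Type} (l : List α) (p q : α → Bool)
    (h : ∀ x ∈ l, p x = q x) : l.all p = l.all q := by
  induction l with
  | nil => rfl
  | cons a t ih =>
    simp only [List.all_cons]
    rw [h a (by simp), ih (fun x hx => h x (by simp [hx]))]

-- B's early-exit loop is the negation of an 'all'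
theorem pv_hasBad_eq (s : PySem.Set Char) :
    ∀ l : List Char, pvHasBad l s
      = !(l.all (fun ch => decide (ch.toNat ≤ 127)
            && (PySem.Chars.isalnum ch || PySem.Set.contains s ch))) := by
  intro l
  induction l with
  | nil => rfl
  | cons ch t ih =>
    simp only [pvHasBad, List.all_cons, ih]
    by_cases h1 : (ch.toNat ≤ 127) <;>
      cases h2 : PySem.Chars.isalnum ch <;>
      cases h3 : PySem.Set.contains s ch <;>
      simp [h1]

-- membership in set(chars) is membership in chars
theorem pv_contains_ofList (l : List Char) (c : Char) :
    PySem.Set.contains (PySem.Set.ofList l) c = decide (c ∈ l) := by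
  cases h : decide (c ∈ l) with
  | true =>
    simp only [decide_eq_true_eq] at h
    simpa [PySem.Set.contains] using (PySem.Set.mem_ofList l c).mpr h
  | false =>
    simp only [decide_eq_false_iff_not] at h
    simpa [PySem.Set.contains] using fun hm => h ((PySem.Set.mem_ofList l c).mp hm)

-- replace.go with a one-character pattern maps the substitution over the list
theorem pv_go_single (o n : Char) :
    ∀ (l : List Char) (fuel : Nat) (acc : List Char), l.length ≤ fuel →
      PySem.Chars.replace.go [o] [n] fuel l acc
        = acc.reverse ++ l.map (fun c => if c = o then n else c) := by
  intro l
  induction l with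
  | nil =>
    intro fuel acc _
    cases fuel <;> simp [PySem.Chars.replace.go]
  | cons c t ih =>
    intro fuel acc hf
    cases fuel with
    | zero => simp at hf
    | succ f =>
      simp only [PySem.Chars.replace.go]
      by_cases hco : c = o
      · have hp : [o].isPrefixOf (c :: t) = true := by simp [List.isPrefixOf, hco]
        rw [if_pos hp]
        simp only [List.length_cons, List.length_nil, Nat.zero_add, List.drop_succ_cons,
          List.drop_zero, List.reverse_cons, List.reverse_nil, List.nil_append]
        rw [ih f _ (by simpa using Nat.le_of_succ_le_succ hf)]
        simp [hco]
      · have hp : [o].isPrefixOf (c :: t) = false := by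
          simp [List.isPrefixOf]
          exact fun h => hco h.symm
        rw [hp]
        simp only [Bool.false_eq_true, if_false]
        rw [ih f _ (by simpa using Nat.le_of_succ_le_succ hf)]
        simp [hco]

-- single-character replace is a map
theorem pv_replace_single (s : List Char) (o n : Char) :
    PySem.Chars.replace s [o] [n] = s.map (fun c => if c = o then n else c) := by
  have h : PySem.Chars.replace s [o] [n] = PySem.Chars.replace.go [o] [n] s.length s [] := by
    simp [PySem.Chars.replace]
  rw [h]
  simpa using pv_go_single o n s s.length [] (le_refl _)

-- the whole fold of single-character replaces is one map over membership
theorem pv_fold_replace (cs : List Char) :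
    ∀ (s : List Char),
      cs.foldl (fun t ch => PySem.Chars.replace t [ch] ['c']) s
        = s.map (fun c => if c ∈ cs then 'c' else c) := by
  induction cs with
  | nil => intro s; simp
  | cons ch cs ih =>
    intro s
    simp only [List.foldl_cons]
    rw [pv_replace_single, ih, List.map_map]
    apply List.map_congr_left
    intro x _
    by_cases hx : x = ch <;> by_cases hm : x ∈ cs <;>
      simp [Function.comp, hx, hm, ite_self]

-- the String-level fold in port A computes the same list
theorem pv_fold_str (cs : List Char) :
    ∀ (s : String),
      (cs.foldl (fun cn ch => PySem.Str.replace cn (String.ofList [ch]) "c") s).toList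
        = cs.foldl (fun t ch => PySem.Chars.replace t [ch] ['c']) s.toList := by
  induction cs with
  | nil => intro s; rfl
  | cons ch cs ih =>
    intro s
    simp only [List.foldl_cons]
    rw [ih, PySem.Str.toList_replace]
    simp

-- ===== VERDICT (by name: the statement is the Claim_ definition above) =====
theorem check_path_name_py_spec : Claim_equal_check_path_name_py := by
  intro name label chars hdom
  unfold Spec_check_path_name_py check_path_name_py check_path_name_py_alt
  by_cases h0 : name = ""
  · simp [h0]
  · simp only [if_neg h0]
    have hdn : ∀ c ∈ name.toList, c.toNat ≤ 126 := by
      unfold Dom_check_path_name_py pvDomStr at hdom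
      simp only [Bool.and_eq_true, List.all_eq_true] at hdom
      intro c hc
      have := hdom.1.1 c hc
      unfold pvDomChar at this
      simp only [Bool.or_eq_true, Bool.and_eq_true, decide_eq_true_eq, beq_iff_eq] at this
      omega
    have hascii : pyIsascii name = true := by
      unfold pyIsascii
      simp only [List.all_eq_true, decide_eq_true_eq]
      exact fun c hc => Nat.le_trans (hdn c hc) (by norm_num)
    have hne : name.toList ≠ [] := fun h => h0 (by
      have := congrArg String.ofList h; simpa using this)
    have hclean :
        (PySem.Str.strIsalnum (chars.toList.foldl
          (fun cn ch => PySem.Str.replace cn (String.ofList [ch]) "c") name))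
        = !(pvHasBad name.toList (PySem.Set.ofList chars.toList)) := by
      rw [PySem.Str.strIsalnum_eq, pv_fold_str, pv_fold_replace,
        pv_hasBad_eq, Bool.not_not]
      unfold PySem.Chars.strIsalnum
      have hemp : (name.toList.map (fun c => if c ∈ chars.toList then 'c' else c)).isEmpty = false := by
        simp [hne]
      rw [hemp]
      simp only [Bool.not_false, Bool.true_and, List.all_map]
      apply pv_all_congr_mem
      intro c hc
      have h127 : decide (c.toNat ≤ 127) = true := by
        simp only [decide_eq_true_eq]
        exact Nat.le_trans (hdn c hc) (by norm_num)
      rw [pv_contains_ofList]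
      by_cases hm : c ∈ chars.toList
      · simp [Function.comp, hm, h127]
        decide
      · simp [Function.comp, hm, h127]
    rw [hascii, hclean]
    cases pvHasBad name.toList (PySem.Set.ofList chars.toList) <;> simp
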